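-- pv_equiv track=rewrite | github.com/DinohRatiarisandy/Competitive-Programming | Codeforces/B. Paint a Strip.py | solve
-- ===== SOURCE A (Python) =====
-- def solve(n):
-- 	sol = 1
-- 	curr = 1
--
-- 	while True:
-- 		if curr >= n:
-- 			return sol
--
-- 		sol += 1
-- 		curr = curr * 2 + 2
-- ===== SOURCE B (Python) =====
-- def solve(n):
--     t = (n + 4) // 3
--     if t <= 1:
--         return 1
--     return (t - 1).bit_length() + 1
-- ===== Notes on version B (the rewrite author's own statement) =====
-- stated objective: alternative
-- what changed: Replaces A's repeated-doubling loop (curr takes the values 3*2^k - 2) with a closed form: compute t = (n+4)//3 and return 1 when t <= 1, else bit_length(t-1) + 1, pure integer arithmetic with no loop.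
import Mathlib
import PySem

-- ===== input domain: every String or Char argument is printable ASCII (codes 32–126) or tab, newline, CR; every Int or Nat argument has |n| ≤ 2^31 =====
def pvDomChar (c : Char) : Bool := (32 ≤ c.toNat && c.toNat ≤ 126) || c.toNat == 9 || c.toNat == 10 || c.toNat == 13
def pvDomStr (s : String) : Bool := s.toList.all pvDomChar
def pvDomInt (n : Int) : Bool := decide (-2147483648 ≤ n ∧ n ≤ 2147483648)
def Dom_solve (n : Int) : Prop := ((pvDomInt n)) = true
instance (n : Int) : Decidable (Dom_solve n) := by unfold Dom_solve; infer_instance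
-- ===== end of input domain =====

-- B replaces A's doubling loop by a closed-form answer 1 + bit_length(t-1) with t = (n+4)//3 (alternative: loop-free integer arithmetic).

-- ===== PORT A =====
-- A's while loop; curr starts at 1 and stays ≥ 1, which the proof argument records for termination.
def solveLoop (n sol curr : Int) (h : 1 ≤ curr) : Int :=
  if curr ≥ n then sol
  else solveLoop n (sol + 1) (curr * 2 + 2) (by omega)
termination_by (n - curr).toNat
decreasing_by omega

def solve (n : Int) : Int := solveLoop n 1 1 (by norm_num)

-- ===== PORT B =====
def solve_alt (n : Int) : Int :=
  let t := PySem.Int.floordiv (n + 4) 3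
  if t ≤ 1 then 1
  else (PySem.Int.bitLength (t - 1) : Int) + 1

-- ===== PRECONDITION & SPEC =====
def Spec_solve (n : Int) (out : Int) : Prop := out = solve_alt n
instance (n : Int) (out : Int) : Decidable (Spec_solve n out) := by unfold Spec_solve; infer_instance

-- ===== CLAIM (what is proved, stated in full; the proofs are below) =====
def Claim_equal_solve : Prop := ∀ (n : Int), Dom_solve n → Spec_solve n (solve n)

-- ===== LEMMAS AND PROOFS =====

-- C k = value of curr after k iterations of A's loop
def pvC (k : Nat) : Int := 3 * 2 ^ k - 2

lemma pvC_pos (k : Nat) : 1 ≤ pvC k := by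
  have : (0 : Int) < 2 ^ k := by positivity
  simp only [pvC]; omega

lemma pvC_succ (k : Nat) : pvC k * 2 + 2 = pvC (k + 1) := by
  simp only [pvC, pow_succ]; ring

-- If j is the first index (from k) where curr ≥ n, the loop returns sol + j.
lemma solveLoop_eq (j : Nat) : ∀ (k : Nat) (n sol : Int),
    n ≤ pvC (k + j) → (∀ i : Nat, i < j → ¬ n ≤ pvC (k + i)) →
    solveLoop n sol (pvC k) (pvC_pos k) = sol + j := by
  induction j with
  | zero =>
    intro k n sol hj _
    rw [solveLoop]
    simp only [ge_iff_le]
    rw [if_pos (by simpa using hj)]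
    simp
  | succ j ih =>
    intro k n sol hj hlt
    rw [solveLoop]
    have h0 : ¬ n ≤ pvC k := by simpa using hlt 0 (Nat.succ_pos j)
    simp only [ge_iff_le]
    rw [if_neg h0]
    have : solveLoop n (sol + 1) (pvC k * 2 + 2) (by have := pvC_pos k; omega) =
        solveLoop n (sol + 1) (pvC (k + 1)) (pvC_pos (k + 1)) := by
      congr 1
      · rw [pvC_succ]
    rw [this, ih (k + 1) n (sol + 1)
      (by simpa [Nat.add_right_comm k 1 j] using hj)
      (by intro i hi; simpa [Nat.add_right_comm k 1 i] using hlt (i + 1) (by omega))]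
    push_cast
    ring

-- n ≤ C k  ↔  t ≤ 2^k,  where t = (n+4)//3
lemma le_pvC_iff (n : Int) (k : Nat) :
    n ≤ pvC k ↔ PySem.Int.floordiv (n + 4) 3 ≤ 2 ^ k := by
  rw [PySem.Int.floordiv_eq_ediv_of_pos (by norm_num)]
  have h1 : (0 : Int) < 2 ^ k := by positivity
  simp only [pvC]
  omega

theorem solve_spec_aux (n : Int) : solve n = solve_alt n := by
  unfold solve solve_alt
  set t := PySem.Int.floordiv (n + 4) 3 with ht
  by_cases h1 : t ≤ 1
  · -- n ≤ 1 = C 0: loop exits immediately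
    have hn : n ≤ pvC 0 := by
      rw [le_pvC_iff, ← ht]; simpa using h1
    have := solveLoop_eq 0 0 n 1 (by simpa using hn) (by intro i hi; omega)
    simp only [pvC] at this
    norm_num at this
    rw [if_pos h1]
    simpa using this
  · rw [if_neg h1]
    replace h1 : 1 < t := lt_of_not_ge h1
    set s := PySem.Int.bitLength (t - 1) with hs
    have htpos : 1 ≤ t - 1 := by omega
    have habs : ((t - 1).natAbs : Int) = t - 1 := Int.natAbs_of_nonneg (by omega)
    -- t ≤ 2^s
    have hub : t ≤ 2 ^ s := by
      have := PySem.Int.lt_two_pow_bitLength (t - 1)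
      rw [← hs] at this
      have : ((t - 1).natAbs : Int) < ((2 ^ s : Nat) : Int) := by exact_mod_cast this
      rw [habs] at this
      push_cast at this
      omega
    -- for i < s, 2^i ≤ t - 1, hence ¬ t ≤ 2^i
    have hlb : ∀ i : Nat, i < s → ¬ t ≤ 2 ^ i := by
      intro i hi
      have hne : t - 1 ≠ 0 := by omega
      have h2 := PySem.Int.two_pow_bitLength_le (t - 1) hne
      rw [← hs] at h2
      have hmono : (2 : Nat) ^ i ≤ 2 ^ (s - 1) := Nat.pow_le_pow_right (by norm_num) (by omega)
      have : ((2 ^ i : Nat) : Int) ≤ ((t - 1).natAbs : Int) := by exact_mod_cast le_trans hmono h2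
      rw [habs] at this
      push_cast at this
      omega
    have := solveLoop_eq s 0 n 1
      (by rw [le_pvC_iff, ← ht]; simpa using hub)
      (by intro i hi; rw [le_pvC_iff, ← ht]; simpa using hlb i hi)
    simp only [pvC] at this
    norm_num at this
    rw [this]
    omega

-- ===== VERDICT (by name: the statement is the Claim_ definition above) =====
theorem solve_spec : Claim_equal_solve := by
  intro n _
  unfold Spec_solve
  exact solve_spec_aux n
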